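-- pv_equiv track=rewrite | github.com/clivepato93/Edabit_challenges | Python/Medium/domino_chain.py | domino_chain
-- ===== SOURCE A (Python) =====
-- def domino_chain(do):
--     s=""
--     n="/"
--     for v in (do):
--         if v=="|" and n:
--             s+=n
--         else:
--             n=None
--             s+=v
--
--     return s
-- ===== SOURCE B (Python) =====
-- def domino_chain(do):
--     k = 0
--     while k < len(do) and do[k] == "|":
--         k += 1
--     return "/" * k + "".join(do[k:])
-- ===== Notes on version B (the rewrite author's own statement) =====
-- stated objective: simpler
-- what changed: B replaces A's stateful character-stream with a break-flag by first computing the length k of the leading run of "|" elements and returning '/'*k + ''.join(do[k:]) built from two slices.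
import Mathlib
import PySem

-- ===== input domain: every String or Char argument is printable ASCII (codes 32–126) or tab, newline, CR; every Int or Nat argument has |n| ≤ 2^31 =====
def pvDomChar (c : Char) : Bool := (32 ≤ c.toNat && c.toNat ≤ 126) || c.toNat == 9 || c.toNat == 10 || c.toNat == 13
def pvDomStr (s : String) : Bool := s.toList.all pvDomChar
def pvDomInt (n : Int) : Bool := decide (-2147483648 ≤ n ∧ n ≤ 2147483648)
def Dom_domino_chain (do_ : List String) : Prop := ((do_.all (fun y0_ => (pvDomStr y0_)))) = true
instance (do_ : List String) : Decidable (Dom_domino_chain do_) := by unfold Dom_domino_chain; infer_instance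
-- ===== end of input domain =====

-- B computes the leading-"|" run length and builds the answer from two pieces; simpler than A's flag-carrying fold.

-- ===== PORT A =====
-- A's loop: state s (accumulated string) and n (Option: some "/" until the chain breaks, then none).
def dcLoopA : List String → String → Option String → String
  | [], s, _ => s
  | v :: rest, s, n =>
      if v = "|" ∧ n.isSome then dcLoopA rest (s ++ n.getD "") n
      else dcLoopA rest (s ++ v) none

def domino_chain (do_ : List String) : String := dcLoopA do_ "" (some "/")

-- ===== PORT B =====
-- k = leading-run length (Source B's while loop counts it); result = "/"*k + "".join(do[k:])
def domino_chain_alt (do_ : List String) : String :=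
  let k := (do_.takeWhile (fun v => v = "|")).length
  String.ofList (List.replicate k '/') ++ String.join (do_.drop k)

-- ===== PRECONDITION & SPEC =====
def Spec_domino_chain (do_ : List String) (out : String) : Prop := out = domino_chain_alt do_
instance (do_ : List String) (out : String) : Decidable (Spec_domino_chain do_ out) := by unfold Spec_domino_chain; infer_instance

-- ===== CLAIM (what is proved, stated in full; the proofs are below) =====
def Claim_equal_domino_chain : Prop := ∀ (do_ : List String), Dom_domino_chain do_ → Spec_domino_chain do_ (domino_chain do_)

-- ===== LEMMAS AND PROOFS =====

-- folding ++ over l starting from a is a ++ (fold from "")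
theorem foldl_str_append (l : List String) (a : String) :
    l.foldl (fun r s => r ++ s) a = a ++ l.foldl (fun r s => r ++ s) "" := by
  induction l generalizing a with
  | nil => simp [String.append_empty]
  | cons v rest ih =>
      simp only [List.foldl_cons]
      rw [ih (a ++ v), ih ("" ++ v), String.empty_append, String.append_assoc]

theorem join_str_cons (v : String) (rest : List String) :
    String.join (v :: rest) = v ++ String.join rest := by
  simp only [String.join, List.foldl_cons, String.empty_append]
  rw [foldl_str_append rest v]

-- Once the flag is none, A's loop just appends the remaining elements.
theorem dcLoopA_none (l : List String) (s : String) :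
    dcLoopA l s none = s ++ String.join l := by
  induction l generalizing s with
  | nil => simp [dcLoopA, String.join, String.append_empty]
  | cons v rest ih =>
      simp only [dcLoopA, Option.isSome_none, Bool.false_eq_true, and_false, if_false, ih,
        join_str_cons, String.append_assoc]

-- With the flag live, A's loop equals s ++ B's closed form.
theorem dcLoopA_some (l : List String) (s : String) :
    dcLoopA l s (some "/") =
      s ++ (String.ofList (List.replicate (l.takeWhile (fun v => v = "|")).length '/')
        ++ String.join (l.drop (l.takeWhile (fun v => v = "|")).length)) := by
  induction l generalizing s with
  | nil => simp [dcLoopA, String.join, String.append_empty]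
  | cons v rest ih =>
      by_cases hv : v = "|"
      · have hslash : "/" ++ String.ofList (List.replicate
            (rest.takeWhile (fun v => v = "|")).length '/') =
            String.ofList (List.replicate
              ((rest.takeWhile (fun v => v = "|")).length + 1) '/') := by
          apply String.ext
          simp [List.replicate_succ]
        subst hv
        have hstep : dcLoopA ("|" :: rest) s (some "/") = dcLoopA rest (s ++ "/") (some "/") := by
          simp [dcLoopA]
        rw [hstep, ih]
        simp only [List.takeWhile_cons, decide_true, if_true, List.length_cons,
          List.drop_succ_cons, ← hslash, String.append_assoc]
      · have hd : (decide (v = "|")) = false := by simp [hv]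
        have hstep : dcLoopA (v :: rest) s (some "/") = dcLoopA rest (s ++ v) none := by
          simp [dcLoopA, hv]
        rw [hstep, dcLoopA_none]
        simp only [List.takeWhile_cons, hd, Bool.false_eq_true, if_false, List.length_nil,
          List.replicate_zero, List.drop_zero]
        rw [join_str_cons, show String.ofList ([] : List Char) = "" from rfl,
          String.empty_append, String.append_assoc]

-- ===== VERDICT (by name: the statement is the Claim_ definition above) =====
theorem domino_chain_spec : Claim_equal_domino_chain := by
  intro do_ _
  unfold Spec_domino_chain domino_chain domino_chain_alt
  simpa using dcLoopA_some do_ ""
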